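-- pv_equiv track=rewrite | github.com/underpass-ai/swe-ai-fleet | e2e/tests/15-workspace-vllm-tool-orchestration/test_workspace_vllm_tool_orchestration.py | _deterministic_order
-- ===== SOURCE A (Python) =====
-- def _deterministic_order(tools: list[str]) -> list[str]:
--     preferred = [
--         "fs.list",
--         "conn.list_profiles",
--         "conn.describe_profile",
--         "nats.request",
--         "nats.subscribe_pull",
--         "kafka.topic_metadata",
--         "kafka.consume",
--         "rabbit.queue_info",
--         "rabbit.consume",
--         "redis.get",
--         "redis.mget",
--         "redis.scan",
--         "redis.ttl",
--         "redis.exists",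
--         "mongo.find",
--         "mongo.aggregate",
--         "fs.read_file",
--         "fs.read",
--         "fs.search",
--         "fs.write_file",
--         "fs.write",
--         "fs.patch",
--         "git.status",
--         "git.diff",
--         "git.apply_patch",
--         "repo.detect_project_type",
--         "repo.detect_toolchain",
--         "repo.validate",
--         "repo.build",
--         "repo.test",
--         "repo.run_tests",
--         "repo.coverage_report",
--         "repo.static_analysis",
--         "repo.package",
--         "security.scan_secrets",
--         "ci.run_pipeline",
--         "go.mod.tidy",
--         "go.generate",
--         "go.build",
--         "go.test",
--         "rust.build",
--         "rust.test",
--         "rust.clippy",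
--         "rust.format",
--         "node.install",
--         "node.build",
--         "node.test",
--         "node.lint",
--         "node.typecheck",
--         "python.install_deps",
--         "python.validate",
--         "python.test",
--         "c.build",
--         "c.test",
--     ]
--     ordered = [name for name in preferred if name in tools]
--     extras = sorted(name for name in tools if name not in ordered)
--     return ordered + extras
-- ===== SOURCE B (Python) =====
-- _GROUPS = [
--     ("fs", ["list"]),
--     ("conn", ["list_profiles", "describe_profile"]),
--     ("nats", ["request", "subscribe_pull"]),
--     ("kafka", ["topic_metadata", "consume"]),
--     ("rabbit", ["queue_info", "consume"]),
--     ("redis", ["get", "mget", "scan", "ttl", "exists"]),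
--     ("mongo", ["find", "aggregate"]),
--     ("fs", ["read_file", "read", "search", "write_file", "write", "patch"]),
--     ("git", ["status", "diff", "apply_patch"]),
--     ("repo", ["detect_project_type", "detect_toolchain", "validate", "build",
--               "test", "run_tests", "coverage_report", "static_analysis",
--               "package"]),
--     ("security", ["scan_secrets"]),
--     ("ci", ["run_pipeline"]),
--     ("go", ["mod.tidy", "generate", "build", "test"]),
--     ("rust", ["build", "test", "clippy", "format"]),
--     ("node", ["install", "build", "test", "lint", "typecheck"]),
--     ("python", ["install_deps", "validate", "test"]),
--     ("c", ["build", "test"]),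
-- ]
--
-- _PREFERRED = [f"{prefix}.{op}" for prefix, ops in _GROUPS for op in ops]
--
-- _PRIORITY = {name: i for i, name in enumerate(_PREFERRED)}
--
--
-- def _deterministic_order(tools: list[str]) -> list[str]:
--     present = {}
--     extras = []
--     for name in tools:
--         if name in _PRIORITY:
--             present[name] = True
--         else:
--             extras.append(name)
--     ordered = sorted(present, key=_PRIORITY.get)
--     extras.sort()
--     return ordered + extras
-- ===== Notes on version B (the rewrite author's own statement) =====
-- stated objective: faster
-- what changed: Replaces A's two membership-scanning comprehensions (preferred filtered by 'in tools', extras filtered by 'not in ordered') with a rank dict built from prefix-grouped name parts and a single pass over tools, the head produced by sorting the present preferred names by rank.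
import Mathlib
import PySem

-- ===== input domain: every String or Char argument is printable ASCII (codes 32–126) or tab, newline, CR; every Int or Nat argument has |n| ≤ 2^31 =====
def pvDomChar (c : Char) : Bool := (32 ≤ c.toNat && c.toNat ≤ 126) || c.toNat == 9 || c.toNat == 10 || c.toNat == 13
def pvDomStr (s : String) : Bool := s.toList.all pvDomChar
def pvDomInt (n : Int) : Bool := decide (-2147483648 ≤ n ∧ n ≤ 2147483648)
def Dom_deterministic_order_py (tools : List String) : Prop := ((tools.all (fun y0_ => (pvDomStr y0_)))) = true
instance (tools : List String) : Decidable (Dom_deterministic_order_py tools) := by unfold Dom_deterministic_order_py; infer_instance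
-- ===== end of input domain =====

-- B builds the preference table from prefix-grouped name parts joined with "." into a
-- rank dict and makes a single pass over tools, sorting the present names by rank
-- (objective: alternative decomposition of the same ordering; return value only).


-- ===== PORT A =====
def deterministic_order_py (tools : List String) : List String :=
  let preferred : List String :=
    ["fs.list",
   "conn.list_profiles",
   "conn.describe_profile",
   "nats.request",
   "nats.subscribe_pull",
   "kafka.topic_metadata",
   "kafka.consume",
   "rabbit.queue_info",
   "rabbit.consume",
   "redis.get",
   "redis.mget",
   "redis.scan",
   "redis.ttl",
   "redis.exists",
   "mongo.find",
   "mongo.aggregate",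
   "fs.read_file",
   "fs.read",
   "fs.search",
   "fs.write_file",
   "fs.write",
   "fs.patch",
   "git.status",
   "git.diff",
   "git.apply_patch",
   "repo.detect_project_type",
   "repo.detect_toolchain",
   "repo.validate",
   "repo.build",
   "repo.test",
   "repo.run_tests",
   "repo.coverage_report",
   "repo.static_analysis",
   "repo.package",
   "security.scan_secrets",
   "ci.run_pipeline",
   "go.mod.tidy",
   "go.generate",
   "go.build",
   "go.test",
   "rust.build",
   "rust.test",
   "rust.clippy",
   "rust.format",
   "node.install",
   "node.build",
   "node.test",
   "node.lint",
   "node.typecheck",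
   "python.install_deps",
   "python.validate",
   "python.test",
   "c.build",
   "c.test"]
  let ordered := preferred.filter (fun name => tools.contains name)
  let extras := PySem.List.sorted (tools.filter (fun name => !ordered.contains name)) (fun x => x) false
  ordered ++ extras

-- ===== PORT B =====
-- _GROUPS: the preferred names grouped by dotted prefix, in preference order
def pvGroupsB : List (String × List String) :=
  [("fs", ["list"]),
   ("conn", ["list_profiles", "describe_profile"]),
   ("nats", ["request", "subscribe_pull"]),
   ("kafka", ["topic_metadata", "consume"]),
   ("rabbit", ["queue_info", "consume"]),
   ("redis", ["get", "mget", "scan", "ttl", "exists"]),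
   ("mongo", ["find", "aggregate"]),
   ("fs", ["read_file", "read", "search", "write_file", "write", "patch"]),
   ("git", ["status", "diff", "apply_patch"]),
   ("repo", ["detect_project_type", "detect_toolchain", "validate", "build", "test", "run_tests", "coverage_report", "static_analysis", "package"]),
   ("security", ["scan_secrets"]),
   ("ci", ["run_pipeline"]),
   ("go", ["mod.tidy", "generate", "build", "test"]),
   ("rust", ["build", "test", "clippy", "format"]),
   ("node", ["install", "build", "test", "lint", "typecheck"]),
   ("python", ["install_deps", "validate", "test"]),
   ("c", ["build", "test"])]

-- _PREFERRED = [f"{prefix}.{op}" for prefix, ops in _GROUPS for op in ops]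
def pvPreferredB : List String :=
  pvGroupsB.flatMap (fun g => g.2.map (fun op => PySem.Str.join "." [g.1, op]))

-- _PRIORITY = {name: i for i, name in enumerate(_PREFERRED)}
def pvPriorityB : PySem.Dict String Int :=
  (PySem.List.enumerate pvPreferredB 0).foldl (fun d p => d.insert p.2 p.1) PySem.Dict.empty

def deterministic_order_py_alt (tools : List String) : List String :=
  let st := tools.foldl
    (fun (st : PySem.Dict String Bool × List String) name =>
      if pvPriorityB.contains name then (st.1.insert name true, st.2)
      else (st.1, st.2 ++ [name]))
    (PySem.Dict.empty, [])
  let ordered := PySem.List.sorted st.1.keys (fun n => pvPriorityB.getD n 0) false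
  ordered ++ PySem.List.sorted st.2 (fun x => x) false

-- ===== PRECONDITION & SPEC =====
def Spec_deterministic_order_py (tools : List String) (out : List String) : Prop := out = deterministic_order_py_alt tools
instance (tools : List String) (out : List String) : Decidable (Spec_deterministic_order_py tools out) := by unfold Spec_deterministic_order_py; infer_instance

-- ===== CLAIM (what is proved, stated in full; the proofs are below) =====
def Claim_equal_deterministic_order_py : Prop := ∀ (tools : List String), Dom_deterministic_order_py tools → Spec_deterministic_order_py tools (deterministic_order_py tools)

-- ===== LEMMAS AND PROOFS =====

-- A's preferred list, as a proof-side name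
def pvPreferredA : List String :=
  ["fs.list",
   "conn.list_profiles",
   "conn.describe_profile",
   "nats.request",
   "nats.subscribe_pull",
   "kafka.topic_metadata",
   "kafka.consume",
   "rabbit.queue_info",
   "rabbit.consume",
   "redis.get",
   "redis.mget",
   "redis.scan",
   "redis.ttl",
   "redis.exists",
   "mongo.find",
   "mongo.aggregate",
   "fs.read_file",
   "fs.read",
   "fs.search",
   "fs.write_file",
   "fs.write",
   "fs.patch",
   "git.status",
   "git.diff",
   "git.apply_patch",
   "repo.detect_project_type",
   "repo.detect_toolchain",
   "repo.validate",
   "repo.build",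
   "repo.test",
   "repo.run_tests",
   "repo.coverage_report",
   "repo.static_analysis",
   "repo.package",
   "security.scan_secrets",
   "ci.run_pipeline",
   "go.mod.tidy",
   "go.generate",
   "go.build",
   "go.test",
   "rust.build",
   "rust.test",
   "rust.clippy",
   "rust.format",
   "node.install",
   "node.build",
   "node.test",
   "node.lint",
   "node.typecheck",
   "python.install_deps",
   "python.validate",
   "python.test",
   "c.build",
   "c.test"]

theorem pvA_unfold (tools : List String) :
    deterministic_order_py tools =
      (pvPreferredA.filter (fun name => tools.contains name)) ++
        PySem.List.sorted
          (tools.filter (fun name => !(pvPreferredA.filter (fun n => tools.contains n)).contains name))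
          (fun x => x) false := rfl

set_option maxRecDepth 20000 in
set_option maxHeartbeats 1000000 in
theorem pvB_eq_A : pvPreferredB = pvPreferredA := by decide

theorem pvNodup_preferred : pvPreferredA.Nodup := by decide

set_option maxRecDepth 20000 in
set_option maxHeartbeats 1000000 in
theorem pvPriority_eq :
    pvPriorityB
      = (PySem.List.enumerate pvPreferredA 0).foldl
          (fun d p => d.insert p.2 p.1) PySem.Dict.empty := by
  unfold pvPriorityB
  rw [pvB_eq_A]

set_option maxRecDepth 20000 in
set_option maxHeartbeats 1000000 in
theorem pvKeys_priority : pvPriorityB.keys = pvPreferredA := by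
  rw [pvPriority_eq]; decide

theorem pvContains_priority (n : String) :
    pvPriorityB.contains n = decide (n ∈ pvPreferredA) := by
  rw [PySem.Dict.contains_eq_decide_mem_keys, pvKeys_priority]

set_option maxRecDepth 20000 in
set_option maxHeartbeats 1000000 in
theorem pvRank_pairwise :
    pvPreferredA.Pairwise (fun a b => pvPriorityB.getD a 0 < pvPriorityB.getD b 0) := by
  rw [pvPriority_eq]; decide

-- the one-pass loop of B, characterised by two filters
theorem pvLoop_eq (tools : List String) (d : PySem.Dict String Bool) (es : List String) :
    tools.foldl
      (fun (st : PySem.Dict String Bool × List String) name =>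
        if pvPriorityB.contains name then (st.1.insert name true, st.2)
        else (st.1, st.2 ++ [name])) (d, es)
    = ((tools.filter (fun n => pvPriorityB.contains n)).foldl
         (fun d n => d.insert n true) d,
       es ++ tools.filter (fun n => !pvPriorityB.contains n)) := by
  induction tools generalizing d es with
  | nil => simp
  | cons x xs ih =>
    by_cases h : pvPriorityB.contains x = true
    · simp [h, ih]
    · simp only [Bool.not_eq_true] at h
      simp [h, ih]

-- head of B = head of A
theorem pvHead_eq (tools : List String) :
    PySem.List.sorted
      (((tools.filter (fun n => pvPriorityB.contains n)).foldl
          (fun (d : PySem.Dict String Bool) n => d.insert n true) PySem.Dict.empty).keys)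
      (fun n => pvPriorityB.getD n 0) false
    = pvPreferredA.filter (fun name => tools.contains name) := by
  rw [PySem.Dict.keys_foldl_insert (f := fun _ _ => true)]
  rw [PySem.Dict.keys_empty]
  have hupd : PySem.Set.update ([] : List String)
      (tools.filter (fun n => pvPriorityB.contains n))
      = PySem.Set.ofList (tools.filter (fun n => pvPriorityB.contains n)) := by
    rw [PySem.Set.ofList_eq_foldl]; rfl
  rw [hupd]
  apply PySem.List.sorted_eq_of_perm_of_pairwise_lt
  · rw [List.perm_ext_iff_of_nodup (List.Nodup.filter _ pvNodup_preferred)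
      (PySem.Set.nodup_ofList _)]
    intro a
    simp only [List.mem_filter, PySem.Set.mem_ofList, pvContains_priority,
      List.contains_iff_mem, decide_eq_true_eq]
    tauto
  · exact List.Pairwise.sublist List.filter_sublist pvRank_pairwise

-- the extras filters coincide on elements of tools
theorem pvExtras_filter_eq (tools : List String) :
    tools.filter (fun name => !(pvPreferredA.filter (fun n => tools.contains n)).contains name)
      = tools.filter (fun n => !pvPriorityB.contains n) := by
  apply List.filter_congr
  intro x hx
  simp [List.mem_filter, pvContains_priority, hx]

-- ===== VERDICT (by name: the statement is the Claim_ definition above) =====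
theorem deterministic_order_py_spec : Claim_equal_deterministic_order_py := by
  intro tools _
  show deterministic_order_py tools = deterministic_order_py_alt tools
  rw [pvA_unfold]
  unfold deterministic_order_py_alt
  rw [pvLoop_eq]
  simp only []
  rw [pvHead_eq, pvExtras_filter_eq]
  simp
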